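-- pv_equiv track=rewrite | github.com/danielalexandreMC/Automatizador-FilispiM | radio_automator/services/podcast_service.py | _extension_from_url_or_type
-- ===== SOURCE A (Python) =====
-- def _extension_from_url_or_type(url: str, content_type: str) -> str:
--     """Determinar extension de archivo desde URL o Content-Type."""
--     # Primero intentar desde URL
--     url_lower = url.lower().split("?")[0]
--     for ext in [".mp3", ".m4a", ".ogg", ".mp4", ".opus", ".flac", ".wav", ".aac"]:
--         if url_lower.endswith(ext):
--             return ext
--
--     # Despues desde Content-Type
--     type_map = {
--         "audio/mpeg": ".mp3",
--         "audio/mp3": ".mp3",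
--         "audio/x-m4a": ".m4a",
--         "audio/mp4": ".m4a",
--         "audio/ogg": ".ogg",
--         "audio/vorbis": ".ogg",
--         "audio/opus": ".opus",
--         "audio/flac": ".flac",
--         "audio/wav": ".wav",
--         "audio/x-wav": ".wav",
--         "audio/aac": ".aac",
--     }
--     ct_lower = content_type.lower().split(";")[0].strip()
--     return type_map.get(ct_lower, ".mp3")
-- ===== SOURCE B (Python) =====
-- _AUDIO_EXTS = frozenset({".mp3", ".m4a", ".ogg", ".mp4", ".opus", ".flac", ".wav", ".aac"})
--
-- # Regular audio/<sub> types whose extension is just "." + sub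
-- _SIMPLE_SUBTYPES = frozenset({"mp3", "ogg", "opus", "flac", "wav", "aac"})
--
-- # Irregular subtypes that do not follow the "." + sub rule
-- _SPECIAL_SUBTYPES = {
--     "mpeg": ".mp3",
--     "x-m4a": ".m4a",
--     "mp4": ".m4a",
--     "vorbis": ".ogg",
--     "x-wav": ".wav",
-- }
--
--
-- def _extension_from_url_or_type(url: str, content_type: str) -> str:
--     """Determinar extension de archivo desde URL o Content-Type."""
--     path = url.lower().split("?")[0]
--     dot = path.rfind(".")
--     if dot != -1 and path[dot:] in _AUDIO_EXTS:
--         return path[dot:]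
--     ct = content_type.lower().split(";")[0].strip()
--     if ct.startswith("audio/"):
--         sub = ct[len("audio/"):]
--         if sub in _SIMPLE_SUBTYPES:
--             return "." + sub
--         return _SPECIAL_SUBTYPES.get(sub, ".mp3")
--     return ".mp3"
-- ===== Notes on version B (the rewrite author's own statement) =====
-- stated objective: alternative
-- what changed: B replaces A's eight endswith scans by extracting the last-dot suffix once (rfind + slice) and testing it against a set, and replaces A's 11-entry content-type dict by parsing the 'audio/<subtype>' structure: regular subtypes yield '.'+subtype directly, with only a 5-entry table for irregular ones.
import Mathlib
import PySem

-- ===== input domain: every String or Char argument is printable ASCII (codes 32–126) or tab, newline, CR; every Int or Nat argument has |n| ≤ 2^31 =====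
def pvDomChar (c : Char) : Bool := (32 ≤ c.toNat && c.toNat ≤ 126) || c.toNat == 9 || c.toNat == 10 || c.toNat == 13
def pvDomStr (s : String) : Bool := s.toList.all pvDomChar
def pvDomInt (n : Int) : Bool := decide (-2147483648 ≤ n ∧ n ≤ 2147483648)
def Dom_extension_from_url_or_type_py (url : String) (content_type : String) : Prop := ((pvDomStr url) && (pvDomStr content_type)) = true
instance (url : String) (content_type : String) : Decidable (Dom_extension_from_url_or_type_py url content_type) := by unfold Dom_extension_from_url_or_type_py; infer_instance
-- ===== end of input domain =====

-- B replaces A's eight-way endswith loop by extracting the last-dot suffix once and testing set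
-- membership, and replaces A's 11-entry content-type dict by deriving the extension from the
-- "audio/<subtype>" structure with a 5-entry table of irregular subtypes (objective: alternative).

-- ===== PORT A =====
def extA_exts : List String := [".mp3", ".m4a", ".ogg", ".mp4", ".opus", ".flac", ".wav", ".aac"]

def extA_typeMap : PySem.Dict String String := PySem.Dict.ofList [
  ("audio/mpeg", ".mp3"), ("audio/mp3", ".mp3"), ("audio/x-m4a", ".m4a"),
  ("audio/mp4", ".m4a"), ("audio/ogg", ".ogg"), ("audio/vorbis", ".ogg"),
  ("audio/opus", ".opus"), ("audio/flac", ".flac"), ("audio/wav", ".wav"),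
  ("audio/x-wav", ".wav"), ("audio/aac", ".aac")]

def extension_from_url_or_type_py (url : String) (content_type : String) : String :=
  let url_lower := ((PySem.Str.split? (PySem.Str.lower url) "?").getD []).headD ""
  -- A's for-loop with early return, as find? over the same list in the same order
  match extA_exts.find? (fun ext => PySem.Str.endswith url_lower ext) with
  | some ext => ext
  | none =>
    let ct_lower := PySem.Str.strip (((PySem.Str.split? (PySem.Str.lower content_type) ";").getD []).headD "")
    PySem.Dict.getD extA_typeMap ct_lower ".mp3"

-- ===== PORT B =====
def extB_set : PySem.Set String := PySem.Set.ofList [".mp3", ".m4a", ".ogg", ".mp4", ".opus", ".flac", ".wav", ".aac"]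

-- regular audio/<sub> types whose extension is just "." + sub
def extB_simple : PySem.Set String := PySem.Set.ofList ["mp3", "ogg", "opus", "flac", "wav", "aac"]

-- irregular subtypes that do not follow the "." + sub rule
def extB_special : PySem.Dict String String := PySem.Dict.ofList [
  ("mpeg", ".mp3"), ("x-m4a", ".m4a"), ("mp4", ".m4a"), ("vorbis", ".ogg"), ("x-wav", ".wav")]

def extension_from_url_or_type_py_alt (url : String) (content_type : String) : String :=
  let path := ((PySem.Str.split? (PySem.Str.lower url) "?").getD []).headD ""
  let dot := PySem.Str.rfind path "."
  if dot ≠ -1 ∧ PySem.Set.contains extB_set (PySem.Str.slice path (some dot) none) then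
    PySem.Str.slice path (some dot) none
  else
    let ct := PySem.Str.strip (((PySem.Str.split? (PySem.Str.lower content_type) ";").getD []).headD "")
    if PySem.Str.startswith ct "audio/" then
      let sub := PySem.Str.slice ct (some 6) none
      if PySem.Set.contains extB_simple sub then "." ++ sub
      else PySem.Dict.getD extB_special sub ".mp3"
    else ".mp3"

-- ===== PRECONDITION & SPEC =====
def Spec_extension_from_url_or_type_py (url : String) (content_type : String) (out : String) : Prop := out = extension_from_url_or_type_py_alt url content_type
instance (url : String) (content_type : String) (out : String) : Decidable (Spec_extension_from_url_or_type_py url content_type out) := by unfold Spec_extension_from_url_or_type_py; infer_instance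

-- ===== CLAIM (what is proved, stated in full; the proofs are below) =====
def Claim_equal_extension_from_url_or_type_py : Prop := ∀ (url : String) (content_type : String), Dom_extension_from_url_or_type_py url content_type → Spec_extension_from_url_or_type_py url content_type (extension_from_url_or_type_py url content_type)

-- ===== LEMMAS AND PROOFS =====

-- ['.'] is a prefix of l.drop i  ↔  the character at index i is '.'
theorem prefixDot (l : List Char) (i : Nat) :
    List.isPrefixOf ['.'] (l.drop i) = true ↔ l[i]? = some '.' := by
  have h0 : (l.drop i)[0]? = l[i]? := by rw [List.getElem?_drop]; norm_num
  rcases h : l.drop i with _ | ⟨c, t⟩ <;> simp_all [List.isPrefixOf] <;>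
    rw [← h0] <;> simp [eq_comm]

-- rfind.go l ['.'] n returns the largest index ≤ n holding '.', or -1 if there is none
theorem go_spec (l : List Char) (n : Nat) :
    (PySem.Chars.rfind.go l ['.'] n = -1 ∧ ∀ i : Nat, i ≤ n → l[i]? ≠ some '.') ∨
    (∃ j : Nat, PySem.Chars.rfind.go l ['.'] n = (j : Int) ∧ j ≤ n ∧ l[j]? = some '.' ∧
      ∀ i : Nat, j < i → i ≤ n → l[i]? ≠ some '.') := by
  induction n with
  | zero =>
    have hgo : PySem.Chars.rfind.go l ['.'] 0 =
        if List.isPrefixOf ['.'] l = true then 0 else -1 := by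
      simp [PySem.Chars.rfind.go]
    by_cases h : List.isPrefixOf ['.'] l = true
    · right
      exact ⟨0, by simp [hgo, h], Nat.le_refl 0, (prefixDot l 0).mp (by simpa using h),
        fun i h1 h2 => absurd (Nat.lt_of_lt_of_le h1 h2) (lt_irrefl 0)⟩
    · left
      refine ⟨by simp [hgo, h], fun i hi => ?_⟩
      interval_cases i
      exact fun hc => h (by simpa using (prefixDot l 0).mpr hc)
  | succ m ih =>
    have hgo : PySem.Chars.rfind.go l ['.'] (m+1) =
        if List.isPrefixOf ['.'] (l.drop (m+1)) = true then ((m : Int)+1)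
        else PySem.Chars.rfind.go l ['.'] m := by
      simp [PySem.Chars.rfind.go]
    by_cases h : List.isPrefixOf ['.'] (l.drop (m+1)) = true
    · right
      refine ⟨m+1, by rw [hgo, if_pos h]; push_cast; ring, Nat.le_refl _,
        (prefixDot l (m+1)).mp h, fun i h1 h2 => by omega⟩
    · have hnot : l[m+1]? ≠ some '.' := fun hc => h ((prefixDot l (m+1)).mpr hc)
      rw [hgo, if_neg h]
      rcases ih with ⟨he, hall⟩ | ⟨j, hj, hjle, hjdot, hmax⟩
      · left
        refine ⟨he, fun i hi => ?_⟩
        rcases Nat.lt_or_ge i (m+1) with h' | h'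
        · exact hall i (by omega)
        · have : i = m+1 := by omega
          subst this; exact hnot
      · right
        refine ⟨j, hj, by omega, hjdot, fun i h1 h2 => ?_⟩
        rcases Nat.lt_or_ge i (m+1) with h' | h'
        · exact hmax i h1 (by omega)
        · have : i = m+1 := by omega
          subst this; exact hnot

-- e, starting with '.' and dotless afterwards, is a suffix of l iff it is exactly the piece
-- of l that starts at l's last dot
theorem endswith_iff (l : List Char) (j : Nat) (e : List Char)
    (hh : e.head? = some '.') (ht : '.' ∉ e.tail)
    (hj : l[j]? = some '.') (hmax : ∀ i : Nat, j < i → l[i]? ≠ some '.') :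
    e <:+ l ↔ e = l.drop j := by
  constructor
  · rintro ⟨u, rfl⟩
    have h0 : (u ++ e)[u.length]? = some '.' := by
      rw [List.getElem?_append_right (Nat.le_refl _)]
      simpa [← List.head?_eq_getElem?] using hh
    have hle : u.length ≤ j := by
      by_contra hlt
      exact hmax u.length (by omega) h0
    have heq : u.length = j := by
      by_contra hne
      have hk : e[j - u.length]? = some '.' := by
        rw [← List.getElem?_append_right (by omega : u.length ≤ j)]
        exact hj
      rcases e with _ | ⟨c, t⟩
      · simp at hh
      · have hk1 : t[j - u.length - 1]? = some '.' := by
          rcases Nat.exists_eq_add_of_lt (by omega : u.length < j) with ⟨k, hke⟩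
          simp only [List.getElem?_cons, show j - u.length = k + 1 by omega] at hk
          rw [show j - u.length - 1 = k by omega]
          simpa using hk
        exact ht (by simpa using List.mem_of_getElem? hk1)
    subst heq
    rw [List.drop_left]
  · rintro rfl
    exact List.drop_suffix j l

-- a find? whose predicate is, on the searched list, equivalent to comparing with a fixed
-- character list, may search with that comparison instead
theorem find?_toList_congr (p : String → Bool) (tl : List Char) (l : List String)
    (h : ∀ e ∈ l, (p e = true ↔ e.toList = tl)) :
    l.find? p = l.find? (fun e => decide (e.toList = tl)) := by
  induction l with
  | nil => rfl
  | cons a l ih =>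
    have ha := h a (List.mem_cons_self)
    by_cases hp : p a = true
    · simp [hp, ha.mp hp]
    · have : ¬ a.toList = tl := fun hc => hp (ha.mpr hc)
      simp only [List.find?_cons, Bool.not_eq_true] at *
      simp [hp, this, ih (fun e he => h e (List.mem_cons_of_mem _ he))]

-- each candidate extension starts with '.' and has no further dot
theorem exts_facts : ∀ e ∈ extA_exts, e.toList.head? = some '.' ∧ '.' ∉ e.toList.tail := by decide

theorem contains_iff (x : String) : PySem.Set.contains extB_set x = true ↔
    x ∈ ([".mp3", ".m4a", ".ogg", ".mp4", ".opus", ".flac", ".wav", ".aac"] : List String) := by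
  show PySem.Set.contains ([".mp3", ".m4a", ".ogg", ".mp4", ".opus", ".flac", ".wav", ".aac"] : List String) x = true ↔ _
  simp [PySem.Set.contains]

-- the URL halves of the two ports agree, for any (already lowered, query-stripped) string
theorem url_half (s : String) :
    extA_exts.find? (fun ext => PySem.Str.endswith s ext) =
      (if PySem.Str.rfind s "." ≠ -1 then
        (if PySem.Set.contains extB_set (PySem.Str.slice s (some (PySem.Str.rfind s ".")) none) then
           some (PySem.Str.slice s (some (PySem.Str.rfind s ".")) none)
         else none)
       else none) := by
  have hrf : PySem.Str.rfind s "." = PySem.Chars.rfind.go s.toList ['.'] s.toList.length := by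
    simp [PySem.Chars.rfind]
  rcases go_spec s.toList s.toList.length with ⟨hgo, hall⟩ | ⟨j, hgo, hjle, hjdot, hmax⟩
  · -- no dot anywhere: both sides are none
    rw [hrf, hgo, if_neg (by simp)]
    refine List.find?_eq_none.mpr (fun e he hc => ?_)
    have hsuf : e.toList <:+ s.toList := by
      rw [← PySem.Chars.endswith_iff s.toList e.toList]
      simpa using hc
    rcases hsuf with ⟨u, hu⟩
    have h0 : s.toList[u.length]? = some '.' := by
      rw [← hu, List.getElem?_append_right (Nat.le_refl _)]
      simpa [← List.head?_eq_getElem?] using (exts_facts e he).1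
    have hlen : u.length ≤ s.toList.length := by
      rw [← hu]; simp
    exact hall u.length hlen h0
  · -- the last dot of s sits at index j
    rw [hrf, hgo, if_pos (by omega)]
    have hmax' : ∀ i : Nat, j < i → s.toList[i]? ≠ some '.' := by
      intro i hi
      by_cases h' : i ≤ s.toList.length
      · exact hmax i hi h'
      · simp [List.getElem?_eq_none (by omega : s.toList.length ≤ i)]
    have hext : (PySem.Str.slice s (some ((j : Nat) : Int)) none).toList = s.toList.drop j := by
      simp [PySem.List.slice_from_natCast]
    have key : ∀ e ∈ extA_exts, (PySem.Str.endswith s e = true ↔ e.toList = s.toList.drop j) := by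
      intro e he
      have hf := exts_facts e he
      have : PySem.Str.endswith s e = PySem.Chars.endswith s.toList e.toList := by simp
      rw [this, PySem.Chars.endswith_iff]
      exact endswith_iff s.toList j e.toList hf.1 hf.2 hjdot hmax'
    rw [find?_toList_congr _ _ _ key]
    set ext := PySem.Str.slice s (some ((j : Nat) : Int)) none with hextdef
    by_cases hm : PySem.Set.contains extB_set ext = true
    · rw [if_pos hm]
      have hd : s.toList.drop j = ext.toList := hext.symm
      rw [hd]
      have hmem := (contains_iff ext).mp hm
      simp only [List.mem_cons, List.not_mem_nil, or_false] at hmem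
      rcases hmem with h|h|h|h|h|h|h|h <;> rw [h] <;> decide
    · rw [if_neg hm]
      refine List.find?_eq_none.mpr (fun e he hc => ?_)
      have : e.toList = ext.toList := by
        rw [hext]; simpa using hc
      have heq : e = ext := String.toList_inj.mp this
      have hmem : ext ∈ ([".mp3", ".m4a", ".ogg", ".mp4", ".opus", ".flac", ".wav", ".aac"] : List String) :=
        heq ▸ (by simpa [extA_exts] using he)
      exact hm ((contains_iff ext).mpr hmem)

-- ct starting with "audio/" is "audio/" followed by its 6th-onward slice
theorem ct_of_sub (ct : String) (h : PySem.Str.startswith ct "audio/" = true) :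
    ct = String.ofList ("audio/".toList ++ (PySem.Str.slice ct (some 6) none).toList) := by
  have hp : "audio/".toList <+: ct.toList := by
    rw [← PySem.Chars.startswith_iff]
    simpa using h
  rcases hp with ⟨t, ht⟩
  have hsl : (PySem.Str.slice ct (some 6) none).toList = ct.toList.drop 6 := by
    simp only [PySem.Chars.slice_eq_listSlice, PySem.Str.toList_slice,
      PySem.List.slice_from ct.toList (show (0:Int) ≤ 6 by norm_num)]
    rfl
  have hd : ct.toList.drop 6 = t := by
    rw [← ht]
    simp
  apply String.toList_inj.mp
  rw [hsl, hd, ht]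
  simp

-- lookup in A's table misses when ct is none of its keys
theorem getD_A_default (ct : String)
    (h1 : ct ≠ "audio/mpeg") (h2 : ct ≠ "audio/mp3") (h3 : ct ≠ "audio/x-m4a")
    (h4 : ct ≠ "audio/mp4") (h5 : ct ≠ "audio/ogg") (h6 : ct ≠ "audio/vorbis")
    (h7 : ct ≠ "audio/opus") (h8 : ct ≠ "audio/flac") (h9 : ct ≠ "audio/wav")
    (h10 : ct ≠ "audio/x-wav") (h11 : ct ≠ "audio/aac") :
    PySem.Dict.getD extA_typeMap ct ".mp3" = ".mp3" := by
  have hmk : extA_typeMap = PySem.Dict.mk [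
    ("audio/mpeg", ".mp3"), ("audio/mp3", ".mp3"), ("audio/x-m4a", ".m4a"),
    ("audio/mp4", ".m4a"), ("audio/ogg", ".ogg"), ("audio/vorbis", ".ogg"),
    ("audio/opus", ".opus"), ("audio/flac", ".flac"), ("audio/wav", ".wav"),
    ("audio/x-wav", ".wav"), ("audio/aac", ".aac")] := by rfl
  rw [hmk, PySem.Dict.getD_eq_get?_getD]
  simp [PySem.Dict.get?, Ne.symm h1, Ne.symm h2, Ne.symm h3, Ne.symm h4, Ne.symm h5,
    Ne.symm h6, Ne.symm h7, Ne.symm h8, Ne.symm h9, Ne.symm h10, Ne.symm h11]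

-- lookup in B's irregular-subtype table misses when sub is none of its keys
theorem getD_B_default (sub : String)
    (n1 : sub ≠ "mpeg") (n2 : sub ≠ "x-m4a") (n3 : sub ≠ "mp4")
    (n4 : sub ≠ "vorbis") (n5 : sub ≠ "x-wav") :
    PySem.Dict.getD extB_special sub ".mp3" = ".mp3" := by
  have hmk : extB_special = PySem.Dict.mk [
    ("mpeg", ".mp3"), ("x-m4a", ".m4a"), ("mp4", ".m4a"),
    ("vorbis", ".ogg"), ("x-wav", ".wav")] := by rfl
  rw [hmk, PySem.Dict.getD_eq_get?_getD]
  simp [PySem.Dict.get?, Ne.symm n1, Ne.symm n2, Ne.symm n3, Ne.symm n4, Ne.symm n5]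

theorem simple_iff (x : String) : PySem.Set.contains extB_simple x = true ↔
    x ∈ (["mp3", "ogg", "opus", "flac", "wav", "aac"] : List String) := by
  show PySem.Set.contains (["mp3", "ogg", "opus", "flac", "wav", "aac"] : List String) x = true ↔ _
  simp [PySem.Set.contains]

-- the content-type halves of the two ports agree, for any (lowered, stripped) string
theorem ct_half (ct : String) :
    PySem.Dict.getD extA_typeMap ct ".mp3" =
      (if PySem.Str.startswith ct "audio/" then
        (if PySem.Set.contains extB_simple (PySem.Str.slice ct (some 6) none) then
           "." ++ PySem.Str.slice ct (some 6) none
         else PySem.Dict.getD extB_special (PySem.Str.slice ct (some 6) none) ".mp3")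
       else ".mp3") := by
  by_cases h1 : ct = "audio/mpeg"
  · subst h1; decide
  by_cases h2 : ct = "audio/mp3"
  · subst h2; decide
  by_cases h3 : ct = "audio/x-m4a"
  · subst h3; decide
  by_cases h4 : ct = "audio/mp4"
  · subst h4; decide
  by_cases h5 : ct = "audio/ogg"
  · subst h5; decide
  by_cases h6 : ct = "audio/vorbis"
  · subst h6; decide
  by_cases h7 : ct = "audio/opus"
  · subst h7; decide
  by_cases h8 : ct = "audio/flac"
  · subst h8; decide
  by_cases h9 : ct = "audio/wav"
  · subst h9; decide
  by_cases h10 : ct = "audio/x-wav"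
  · subst h10; decide
  by_cases h11 : ct = "audio/aac"
  · subst h11; decide
  rw [getD_A_default ct h1 h2 h3 h4 h5 h6 h7 h8 h9 h10 h11]
  by_cases hs : PySem.Str.startswith ct "audio/" = true
  · rw [if_pos hs]
    have hct := ct_of_sub ct hs
    by_cases hm : PySem.Set.contains extB_simple (PySem.Str.slice ct (some 6) none) = true
    · exfalso
      have hmem := (simple_iff _).mp hm
      simp only [List.mem_cons, List.not_mem_nil, or_false] at hmem
      rcases hmem with h|h|h|h|h|h
      · exact h2 (by rw [hct, h]; decide)
      · exact h5 (by rw [hct, h]; decide)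
      · exact h7 (by rw [hct, h]; decide)
      · exact h8 (by rw [hct, h]; decide)
      · exact h9 (by rw [hct, h]; decide)
      · exact h11 (by rw [hct, h]; decide)
    · rw [if_neg hm]
      have n1 : PySem.Str.slice ct (some 6) none ≠ "mpeg" := fun h => h1 (by rw [hct, h]; decide)
      have n2 : PySem.Str.slice ct (some 6) none ≠ "x-m4a" := fun h => h3 (by rw [hct, h]; decide)
      have n3 : PySem.Str.slice ct (some 6) none ≠ "mp4" := fun h => h4 (by rw [hct, h]; decide)
      have n4 : PySem.Str.slice ct (some 6) none ≠ "vorbis" := fun h => h6 (by rw [hct, h]; decide)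
      have n5 : PySem.Str.slice ct (some 6) none ≠ "x-wav" := fun h => h10 (by rw [hct, h]; decide)
      rw [getD_B_default _ n1 n2 n3 n4 n5]
  · rw [if_neg hs]

-- glue: A's match-on-found-extension against B's single conditional, with equal fallbacks
theorem glue (d : Int) (e ctA ctB : String) (hct : ctA = ctB) :
    (match (if d ≠ -1 then (if PySem.Set.contains extB_set e then some e else none)
            else none : Option String) with
     | some ext => ext
     | none => ctA) =
    (if d ≠ -1 ∧ PySem.Set.contains extB_set e then e else ctB) := by
  by_cases hd : d = -1
  · simp [hd, hct]
  · by_cases hm : e ∈ extB_set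
    · simp [hd, hm]
    · simp [hd, hm, hct]

-- ===== VERDICT (by name: the statement is the Claim_ definition above) =====
set_option maxHeartbeats 1000000 in
theorem extension_from_url_or_type_py_spec : Claim_equal_extension_from_url_or_type_py := by
  intro url content_type _
  unfold Spec_extension_from_url_or_type_py
  simp only [extension_from_url_or_type_py, extension_from_url_or_type_py_alt]
  rw [url_half]
  exact glue _ _ _ _ (ct_half _)
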